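-- pv_equiv track=rewrite | github.com/mackenzi-kintsugi/bookbot | main.py | get_num_letters
-- ===== SOURCE A (Python) =====
-- def get_num_letters(text):
--     letter_counts = {}
--     lowered_string = text.lower()
--     for letter in lowered_string:
--         if letter.isalpha(): # Outer if: checks if the character is a letter
--             if letter in letter_counts: # Inner if: executes if letter is already in dictionary
--                 letter_counts[letter] += 1
--             else: # Executes if letter is not in the dictionary
--                 letter_counts[letter] = 1
--
--     # Sort the dictionary by keys, and store it in a new variable
--     return dict(sorted(letter_counts.items()))
-- ===== SOURCE B (Python) =====
-- def _runs(s):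
--     # run-length encode a sorted list: [(value, run length), ...]
--     if not s:
--         return []
--     n = 1
--     while n < len(s) and s[n] == s[0]:
--         n += 1
--     return [(s[0], n)] + _runs(s[n:])
--
-- def get_num_letters(text):
--     letters = sorted(c for c in text.lower() if c.isalpha())
--     return dict(_runs(letters))
-- ===== Notes on version B (the rewrite author's own statement) =====
-- stated objective: alternative
-- what changed: A tallies letters incrementally in a dict during one pass and sorts the items at the end; B sorts the filtered letters first and then run-length encodes consecutive equal runs of the sorted list, so no counting table is ever built.
import Mathlib
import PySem

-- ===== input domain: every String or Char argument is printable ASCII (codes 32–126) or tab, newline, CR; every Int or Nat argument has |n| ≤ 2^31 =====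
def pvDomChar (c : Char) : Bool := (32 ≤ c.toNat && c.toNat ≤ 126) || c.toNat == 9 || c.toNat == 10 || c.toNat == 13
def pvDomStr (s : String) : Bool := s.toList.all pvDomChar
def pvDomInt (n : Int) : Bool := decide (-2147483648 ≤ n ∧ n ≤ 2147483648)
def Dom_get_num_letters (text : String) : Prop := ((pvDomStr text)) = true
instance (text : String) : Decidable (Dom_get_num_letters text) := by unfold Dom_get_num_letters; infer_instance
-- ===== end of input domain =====

-- B sorts the alphabetic letters first and run-length encodes the sorted list, instead of
-- A's incremental dict tally sorted at the end; objective: alternative algorithm, same result.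

-- ===== PORT A =====
def get_num_letters (text : String) : List (String × Int) :=
  let lowered := PySem.Str.lower text
  let d := lowered.toList.foldl (fun d c =>
      if PySem.Chars.isalpha c then
        if d.contains (String.ofList [c]) then
          d.insert (String.ofList [c]) (d.getD (String.ofList [c]) 0 + 1)
        else
          d.insert (String.ofList [c]) 1
      else d) (PySem.Dict.empty : PySem.Dict String Int)
  PySem.List.sorted2 d.items (fun p => p.1) (fun p => p.2)

-- ===== PORT B =====
-- _runs: run-length encode a sorted list (hand-ported step for step; the inner while loop
-- counting the equal prefix is the takeWhile length, s[n:] is the dropWhile remainder).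
def pvRunsB (s : List String) : List (String × Int) :=
  match s with
  | [] => []
  | x :: xs =>
    let n := (xs.takeWhile (fun y => y == x)).length + 1
    (x, (n : Int)) :: pvRunsB (xs.dropWhile (fun y => y == x))
termination_by s.length
decreasing_by
  have := List.length_dropWhile_le (l := xs) (p := fun y => y == x)
  simp only [List.length_cons]
  omega

def get_num_letters_alt (text : String) : List (String × Int) :=
  let letters := ((PySem.Str.lower text).toList.filter
      (fun c => PySem.Chars.isalpha c)).map (fun c => String.ofList [c])
  pvRunsB (PySem.List.sorted letters (fun s => s) false)

-- ===== PRECONDITION & SPEC =====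
def Spec_get_num_letters (text : String) (out : List (String × Int)) : Prop := out = get_num_letters_alt text
instance (text : String) (out : List (String × Int)) : Decidable (Spec_get_num_letters text out) := by unfold Spec_get_num_letters; infer_instance

-- ===== CLAIM (what is proved, stated in full; the proofs are below) =====
def Claim_equal_get_num_letters : Prop := ∀ (text : String), Dom_get_num_letters text → Spec_get_num_letters text (get_num_letters text)

-- ===== LEMMAS AND PROOFS =====

-- A's loop body, collapsed: both branches insert count+1 (count = 0 when the key is fresh).
theorem pv_step_collapse (d : PySem.Dict String Int) (s : String) :
    (if d.contains s then d.insert s (d.getD s 0 + 1) else d.insert s 1)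
      = d.insert s (d.getD s 0 + 1) := by
  by_cases h : d.contains s
  · simp [h]
  · have h' : d.contains s = false := by simpa using h
    rw [PySem.Dict.getD_of_not_contains d 0 h']
    simp [h']

-- A's whole loop over the lowered characters is the counting loop over the alphabetic
-- one-character strings, in order.
theorem pv_fold_eq_counter_fold (cs : List Char) (d : PySem.Dict String Int) :
    cs.foldl (fun d c =>
        if PySem.Chars.isalpha c then
          if d.contains (String.ofList [c]) then
            d.insert (String.ofList [c]) (d.getD (String.ofList [c]) 0 + 1)
          else
            d.insert (String.ofList [c]) 1
        else d) d
      = ((cs.filter (fun c => PySem.Chars.isalpha c)).map (fun c => String.ofList [c])).foldl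
          (fun d s => d.insert s (d.getD s 0 + 1)) d := by
  have hstep : (fun (d : PySem.Dict String Int) (c : Char) =>
      if PySem.Chars.isalpha c then
        if d.contains (String.ofList [c]) then
          d.insert (String.ofList [c]) (d.getD (String.ofList [c]) 0 + 1)
        else
          d.insert (String.ofList [c]) 1
      else d)
      = (fun (d : PySem.Dict String Int) (c : Char) =>
        if PySem.Chars.isalpha c then
          d.insert (String.ofList [c]) (d.getD (String.ofList [c]) 0 + 1)
        else d) := by
    funext d c
    by_cases h : PySem.Chars.isalpha c
    · simp only [if_pos h, pv_step_collapse]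
    · simp [h]
  rw [hstep]
  induction cs generalizing d with
  | nil => rfl
  | cons c cs ih =>
    by_cases h : PySem.Chars.isalpha c
    · simp only [List.foldl_cons, List.filter_cons, h, if_pos, List.map_cons]
      exact ih _
    · simp only [List.foldl_cons, List.filter_cons, if_neg h]
      simpa [h] using ih d

-- insertBy only looks at 'before x y' for y already in the list.
theorem pv_insertBy_congr {α : Type} (before before' : α → α → Bool) (x : α) :
    ∀ acc : List α, (∀ y ∈ acc, before x y = before' x y) →
      PySem.List.insertBy before x acc = PySem.List.insertBy before' x acc := by
  intro acc
  induction acc with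
  | nil => intro _; rfl
  | cons y ys ih =>
    intro h
    have hy := h y (by simp)
    simp only [PySem.List.insertBy, hy]
    by_cases hb : before' x y
    · simp [hb]
    · simp only [hb, if_neg, Bool.false_eq_true, not_false_iff]
      rw [ih (fun z hz => h z (by simp [hz]))]

theorem pv_foldl_insertBy_congr {α : Type} (before before' : α → α → Bool) :
    ∀ (xs acc : List α),
      (∀ x ∈ xs, ∀ y, (y ∈ xs ∨ y ∈ acc) → before x y = before' x y) →
      xs.foldl (fun acc x => PySem.List.insertBy before x acc) acc
        = xs.foldl (fun acc x => PySem.List.insertBy before' x acc) acc := by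
  intro xs
  induction xs with
  | nil => intro acc _; rfl
  | cons x xs ih =>
    intro acc h
    simp only [List.foldl_cons]
    rw [pv_insertBy_congr before before' x acc
      (fun y hy => h x (by simp) y (Or.inr hy))]
    exact ih _ (fun z hz y hy => by
      rcases hy with hy | hy
      · exact h z (by simp [hz]) y (Or.inl (List.mem_cons_of_mem _ hy))
      · rcases (PySem.List.mem_insertBy _ _ _ _).1 hy with rfl | hy'
        · exact h z (by simp [hz]) y (by simp)
        · exact h z (by simp [hz]) y (Or.inr hy'))

-- When first components are pairwise distinct, Python's tuple sort is the sort by first component.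
theorem pv_sorted2_eq_sorted_fst (xs : List (String × Int))
    (hnd : (xs.map Prod.fst).Nodup) :
    PySem.List.sorted2 xs (fun p => p.1) (fun p => p.2) false
      = PySem.List.sorted xs (fun p => p.1) false := by
  rw [PySem.List.sorted_eq_foldl_insertBy]
  show xs.foldl (fun acc x => PySem.List.insertBy _ x acc) [] = _
  apply pv_foldl_insertBy_congr
  intro x hx y hy
  rcases hy with hy | hy
  · by_cases h1 : x.1 < y.1
    · simp [h1]
    · by_cases h2 : y.1 < x.1
      · simp [h2, lt_asymm h2]
      · have hxy : x = y :=
          List.inj_on_of_nodup_map hnd hx hy (le_antisymm (not_lt.1 h2) (not_lt.1 h1))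
        subst hxy
        simp
  · simp at hy

-- every key of a run-length encoding occurs in the list
theorem pv_runs_keys_mem : ∀ (s : List String) (p : String × Int), p ∈ pvRunsB s → p.1 ∈ s := by
  intro s
  induction s using pvRunsB.induct with
  | case1 => intro p hp; simp [pvRunsB] at hp
  | case2 x xs ih =>
    intro p hp
    rw [pvRunsB] at hp
    rcases List.mem_cons.1 hp with rfl | hp
    · simp
    · exact List.mem_cons_of_mem _ ((xs.dropWhile_sublist _).mem (ih p hp))

-- after dropping the leading run of x from a tail that is ≥ x and sorted, everything is > x
theorem pv_dropWhile_gt (x : String) :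
    ∀ (l : List String), (∀ y ∈ l, x ≤ y) → l.Pairwise (· ≤ ·) →
      ∀ y ∈ l.dropWhile (fun y => y == x), x < y := by
  intro l
  induction l with
  | nil => intro _ _ y hy; simp at hy
  | cons a l ih =>
    intro hle hp y hy
    by_cases ha : a = x
    · subst ha
      rw [List.dropWhile_cons_of_pos (by simp)] at hy
      exact ih (fun z hz => hle z (List.mem_cons_of_mem _ hz)) (List.Pairwise.of_cons hp) y hy
    · rw [List.dropWhile_cons_of_neg (by simpa using ha)] at hy
      have hxa : x < a := lt_of_le_of_ne (hle a (by simp)) (Ne.symm ha)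
      rcases List.mem_cons.1 hy with rfl | hy
      · exact hxa
      · exact lt_of_lt_of_le hxa ((List.pairwise_cons.1 hp).1 y hy)

-- keys of a run-length encoding of a sorted list are strictly increasing
theorem pv_runs_pairwise : ∀ (s : List String), s.Pairwise (· ≤ ·) →
    (pvRunsB s).Pairwise (fun a b => a.1 < b.1) := by
  intro s
  induction s using pvRunsB.induct with
  | case1 => intro _; simp [pvRunsB]
  | case2 x xs ih =>
    intro hp
    rw [pvRunsB]
    have hxs : ∀ y ∈ xs, x ≤ y := (List.pairwise_cons.1 hp).1
    have hpxs : xs.Pairwise (· ≤ ·) := (List.pairwise_cons.1 hp).2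
    have hd : ∀ y ∈ xs.dropWhile (fun y => y == x), x < y := pv_dropWhile_gt x xs hxs hpxs
    refine List.pairwise_cons.2 ⟨?_, ih (hpxs.sublist (xs.dropWhile_sublist _))⟩
    intro p hp'
    exact hd p.1 (pv_runs_keys_mem _ p hp')

-- run-length encoding of a sorted list is a permutation of the (distinct key, count) pairs
theorem pv_runs_perm : ∀ (s : List String), s.Pairwise (· ≤ ·) →
    (pvRunsB s).Perm ((PySem.Set.ofList s).map (fun k => (k, (s.count k : Int)))) := by
  intro s
  induction s using pvRunsB.induct with
  | case1 => intro _; simp [pvRunsB]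
  | case2 x xs ih =>
    intro hp
    have hxs : ∀ y ∈ xs, x ≤ y := (List.pairwise_cons.1 hp).1
    have hpxs : xs.Pairwise (· ≤ ·) := (List.pairwise_cons.1 hp).2
    rw [pvRunsB]
    set t := xs.takeWhile (fun y => y == x) with ht
    set d := xs.dropWhile (fun y => y == x) with hd
    have hsplit : xs = t ++ d := (List.takeWhile_append_dropWhile (p := fun y => y == x) (l := xs)).symm
    have htx : ∀ y ∈ t, y = x := by
      intro y hy
      have := List.mem_takeWhile_imp hy
      simpa using this
    have hdgt : ∀ y ∈ d, x < y := pv_dropWhile_gt x xs hxs hpxs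
    have hdx : ∀ y ∈ d, y ≠ x := fun y hy => ne_of_gt (hdgt y hy)
    have hpd : d.Pairwise (· ≤ ·) := hpxs.sublist (xs.dropWhile_sublist _)
    have htcount : t.count x = t.length := by
      rw [List.count_eq_length]
      intro b hb; exact (htx b hb).symm
    have hdzero : d.count x = 0 := List.count_eq_zero.2 (fun h => (hdx x h) rfl)
    have hcx : (x :: xs).count x = t.length + 1 := by
      rw [hsplit]
      simp [List.count_append, htcount, hdzero]
    have hck : ∀ k ∈ d, (x :: xs).count k = d.count k := by
      intro k hk
      have hkx : k ≠ x := hdx k hk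
      rw [hsplit]
      have h0 : t.count k = 0 := List.count_eq_zero.2 (fun h => hkx (htx k h))
      simp [List.count_append, h0, Ne.symm hkx]
    have hset : (PySem.Set.ofList (x :: xs)).Perm (x :: PySem.Set.ofList d) := by
      apply (List.perm_ext_iff_of_nodup (PySem.Set.nodup_ofList _) ?_).2
      · intro y
        rw [PySem.Set.mem_ofList]
        constructor
        · intro hy
          rcases List.mem_cons.1 hy with rfl | hy
          · simp
          · rw [hsplit] at hy
            rcases List.mem_append.1 hy with hy | hy
            · simp [htx y hy]
            · exact List.mem_cons_of_mem _ ((PySem.Set.mem_ofList _ _).2 hy)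
        · intro hy
          rcases List.mem_cons.1 hy with rfl | hy
          · simp
          · have hyd : y ∈ d := (PySem.Set.mem_ofList _ _).1 hy
            exact List.mem_cons_of_mem _ (by rw [hsplit]; exact List.mem_append.2 (Or.inr hyd))
      · refine List.nodup_cons.2 ⟨?_, PySem.Set.nodup_ofList _⟩
        intro hx
        exact (hdx x ((PySem.Set.mem_ofList _ _).1 hx)) rfl
    refine List.Perm.trans (List.Perm.cons _ (ih hpd)) ?_
    have hmap : ((x, ((t.length + 1 : Nat) : Int)) :
          String × Int) :: (PySem.Set.ofList d).map (fun k => (k, (d.count k : Int)))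
        = (x :: PySem.Set.ofList d).map (fun k => (k, ((x :: xs).count k : Int))) := by
      simp only [List.map_cons]
      congr 1
      · rw [hcx]
      · apply List.map_congr_left
        intro k hk
        rw [hck k ((PySem.Set.mem_ofList _ _).1 hk)]
    rw [hmap]
    exact List.Perm.map _ hset.symm

-- ===== VERDICT (by name: the statement is the Claim_ definition above) =====
theorem get_num_letters_spec : Claim_equal_get_num_letters := by
  intro text _
  unfold Spec_get_num_letters get_num_letters get_num_letters_alt
  simp only []
  rw [pv_fold_eq_counter_fold]
  rw [PySem.Dict.foldl_insert_getD_add_one_eq_counter, PySem.Dict.items_counter]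
  set L := ((PySem.Str.lower text).toList.filter (fun c => PySem.Chars.isalpha c)).map
      (fun c => String.ofList [c]) with hL
  set S := PySem.List.sorted L (fun s => s) false with hS
  have hSL : S.Perm L := PySem.List.sorted_perm _ _ _
  have hSp : S.Pairwise (· ≤ ·) := by
    have := PySem.List.sorted_pairwise (xs := L) (key := fun s : String => s)
    simpa using this
  have hnd : (((PySem.Set.ofList L).map (fun k => (k, (L.count k : Int)))).map Prod.fst).Nodup := by
    have : ((PySem.Set.ofList L).map (fun k => (k, (L.count k : Int)))).map Prod.fst
        = PySem.Set.ofList L := by simp [Function.comp_def]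
    rw [this]
    exact PySem.Set.nodup_ofList L
  rw [pv_sorted2_eq_sorted_fst _ hnd]
  apply PySem.List.sorted_eq_of_perm_of_pairwise_lt
  · have hcount : (fun k : String => (k, (S.count k : Int))) = (fun k => (k, (L.count k : Int))) := by
      funext k; rw [hSL.count_eq]
    have hsetperm : (PySem.Set.ofList S).Perm (PySem.Set.ofList L) := by
      apply (List.perm_ext_iff_of_nodup (PySem.Set.nodup_ofList _) (PySem.Set.nodup_ofList _)).2
      intro y
      rw [PySem.Set.mem_ofList, PySem.Set.mem_ofList]
      exact ⟨fun h => hSL.mem_iff.1 h, fun h => hSL.mem_iff.2 h⟩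
    refine List.Perm.trans (pv_runs_perm S hSp) ?_
    rw [hcount]
    exact List.Perm.map _ hsetperm
  · exact pv_runs_pairwise S hSp
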